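-- pv_equiv track=rewrite | github.com/hectwilliams/AlgorithmBook | chapter10/python/chap_10.py | is_perfect_pangram
-- ===== SOURCE A (Python) =====
-- def is_perfect_pangram(s):
--     s = s.lower()
--     histo_lower = {}
--     histo_upper = {}
--     count_lower = 0
--     count_upper = 0
--
--     for i in range(len(s)):
--         c = s[i]
--
--         if ord(c) >= 65 and ord(c) <= 90:
--             if c not in histo_upper:
--                 histo_upper[c] = True
--                 count_upper += 1
--             else:
--                 return False
--
--         if ord(c) >= 97 and ord(c) <= 122:
--             if c not in histo_lower:
--                 histo_lower[c] = True
--                 count_lower += 1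
--             else:
--                 return False
--
--
--     return  (count_upper + count_lower) == 26
-- ===== SOURCE B (Python) =====
-- def is_perfect_pangram(s):
--     t = s.lower()
--     letters = sorted(c for c in t if 'a' <= c <= 'z')
--     return letters == list('abcdefghijklmnopqrstuvwxyz')
-- ===== Notes on version B (the rewrite author's own statement) =====
-- stated objective: idiomatic
-- what changed: Replaces A's per-character histogram dicts, duplicate early-return and running counts by a one-liner: filter the lowercased string to ASCII letters, sort them, and compare with the alphabet.
import Mathlib
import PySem

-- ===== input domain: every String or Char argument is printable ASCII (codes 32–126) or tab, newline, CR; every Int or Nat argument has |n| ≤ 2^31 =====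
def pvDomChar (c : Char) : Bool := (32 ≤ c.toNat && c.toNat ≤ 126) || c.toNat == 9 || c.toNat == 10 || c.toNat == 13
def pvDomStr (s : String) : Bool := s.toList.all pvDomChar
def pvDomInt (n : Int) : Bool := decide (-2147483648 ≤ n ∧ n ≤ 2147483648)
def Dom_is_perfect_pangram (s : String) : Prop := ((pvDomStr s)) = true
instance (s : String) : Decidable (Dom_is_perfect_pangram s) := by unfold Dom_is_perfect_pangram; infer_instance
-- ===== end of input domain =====

-- B replaces A's per-char histogram/count loop by filter-sort-compare against the alphabet (alternative algorithm, same behaviour).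


-- ===== PORT A =====
-- The two ord-ranges 65..90 and 97..122 are disjoint, so Python's two consecutive
-- `if` statements (each continuing the loop or returning False) are transcribed as
-- a chained if/else-if with the branches in the same order.
def pvALoop (cs : List Char) (hu hl : PySem.Dict Char Bool) (cu cl : Int) : Bool :=
  match cs with
  | [] => decide (cu + cl = 26)
  | c :: rest =>
    if 65 ≤ c.toNat ∧ c.toNat ≤ 90 then
      if hu.contains c = false then pvALoop rest (hu.insert c true) hl (cu + 1) cl
      else false
    else if 97 ≤ c.toNat ∧ c.toNat ≤ 122 then
      if hl.contains c = false then pvALoop rest hu (hl.insert c true) cu (cl + 1)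
      else false
    else pvALoop rest hu hl cu cl

def is_perfect_pangram (s : String) : Bool :=
  pvALoop (PySem.Str.lower s).toList PySem.Dict.empty PySem.Dict.empty 0 0

-- ===== PORT B =====
def pvAlphabet : List Char :=
  ['a','b','c','d','e','f','g','h','i','j','k','l','m',
   'n','o','p','q','r','s','t','u','v','w','x','y','z']

def is_perfect_pangram_alt (s : String) : Bool :=
  let t := PySem.Str.lower s
  let letters := PySem.List.sorted (t.toList.filter (fun c => decide ('a' ≤ c) && decide (c ≤ 'z'))) (fun c => c)
  letters == pvAlphabet

-- ===== PRECONDITION & SPEC =====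
def Spec_is_perfect_pangram (s : String) (out : Bool) : Prop := out = is_perfect_pangram_alt s
instance (s : String) (out : Bool) : Decidable (Spec_is_perfect_pangram s out) := by unfold Spec_is_perfect_pangram; infer_instance

-- ===== CLAIM (what is proved, stated in full; the proofs are below) =====
def Claim_equal_is_perfect_pangram : Prop := ∀ (s : String), Dom_is_perfect_pangram s → Spec_is_perfect_pangram s (is_perfect_pangram s)

-- ===== LEMMAS AND PROOFS =====

def pvIsLower (c : Char) : Bool := decide ('a' ≤ c) && decide (c ≤ 'z')

lemma pvIsLower_iff (c : Char) : pvIsLower c = true ↔ (97 ≤ c.toNat ∧ c.toNat ≤ 122) := by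
  simp only [pvIsLower, Bool.and_eq_true, decide_eq_true_eq]
  exact Iff.rfl

lemma pvLowerChar_not_upper (c : Char) :
    ¬(65 ≤ (PySem.Chars.lowerChar c).toNat ∧ (PySem.Chars.lowerChar c).toNat ≤ 90) := by
  unfold PySem.Chars.lowerChar PySem.Chars.isupper
  split_ifs with h
  · simp only [Bool.and_eq_true, decide_eq_true_eq] at h
    have h1 : 65 ≤ c.toNat ∧ c.toNat ≤ 90 := h
    rw [Char.toNat_ofNat]
    have : (c.toNat + 32).isValidChar := by
      constructor; omega
    simp [this]; omega
  · intro hc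
    exact h (by simp only [Bool.and_eq_true, decide_eq_true_eq]; exact hc)

lemma pvMem_alphabet (c : Char) (h1 : 97 ≤ c.toNat) (h2 : c.toNat ≤ 122) : c ∈ pvAlphabet := by
  have hv : Char.ofNat c.toNat = c := Char.ofNat_toNat c
  rw [← hv]
  interval_cases h : c.toNat <;> decide

lemma pvLoop_iff (cs : List Char) (hnu : ∀ c ∈ cs, ¬(65 ≤ c.toNat ∧ c.toNat ≤ 90))
    (hu hl : PySem.Dict Char Bool) (cu cl : Int) :
    pvALoop cs hu hl cu cl = true ↔
      ((cs.filter pvIsLower).Nodup ∧ (∀ c ∈ cs.filter pvIsLower, hl.contains c = false)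
        ∧ cu + cl + (cs.filter pvIsLower).length = 26) := by
  induction cs generalizing hl cl with
  | nil => simp [pvALoop]
  | cons c rest ih =>
    have hcu := hnu c (by simp)
    have hnu' : ∀ c' ∈ rest, ¬(65 ≤ c'.toNat ∧ c'.toNat ≤ 90) :=
      fun c' hc' => hnu c' (by simp [hc'])
    rw [pvALoop, if_neg hcu]
    by_cases hL : pvIsLower c = true
    · rw [if_pos ((pvIsLower_iff c).mp hL)]
      by_cases hc : hl.contains c = false
      · rw [if_pos hc, ih hnu']
        simp only [List.filter_cons, hL, if_pos, List.nodup_cons, List.mem_cons,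
          List.length_cons, PySem.Dict.contains_insert, Bool.or_eq_false_iff, beq_eq_false_iff_ne]
        constructor
        · rintro ⟨hnd, hall, hlen⟩
          exact ⟨⟨fun hm => (hall _ hm).1 rfl, hnd⟩,
                 fun c' hc' => hc'.elim (fun he => he ▸ hc) (fun hm => (hall _ hm).2),
                 by push_cast at *; omega⟩
        · rintro ⟨⟨hn1, hnd⟩, hall, hlen⟩
          exact ⟨hnd, fun c' hm => ⟨fun he => hn1 (he ▸ hm), hall _ (Or.inr hm)⟩,
                 by push_cast at *; omega⟩
      · rw [if_neg hc]
        simp only [Bool.not_eq_false] at hc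
        constructor
        · intro h; exact absurd h (by simp)
        · rintro ⟨-, hall, -⟩
          have hcmem : c ∈ List.filter pvIsLower (c :: rest) := by simp [hL]
          have hfalse := hall c hcmem
          rw [hc] at hfalse; exact absurd hfalse (by simp)
    · have hnL : ¬(97 ≤ c.toNat ∧ c.toNat ≤ 122) := fun h => hL ((pvIsLower_iff c).mpr h)
      rw [if_neg hnL, ih hnu']
      simp [hL]

lemma pvSorted_eq_alph_iff (f : List Char) (hmem : ∀ c ∈ f, pvIsLower c = true) :
    (PySem.List.sorted f (fun c => c) = pvAlphabet) ↔ (f.Nodup ∧ f.length = 26) := by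
  constructor
  · intro h
    have hp : pvAlphabet.Perm f := h ▸ (PySem.List.sorted_perm f (fun c => c) false)
    refine ⟨hp.nodup_iff.mp (by decide), ?_⟩
    have := hp.length_eq
    simp [pvAlphabet] at this
    omega
  · rintro ⟨hnd, hlen⟩
    have hsub : f ⊆ pvAlphabet := by
      intro c hc
      have h := (pvIsLower_iff c).mp (hmem c hc)
      exact pvMem_alphabet c h.1 h.2
    have hperm : f.Perm pvAlphabet :=
      (hnd.subperm hsub).perm_of_length_le (by simp [pvAlphabet, hlen])
    exact PySem.List.sorted_eq_of_perm_of_pairwise_lt f pvAlphabet (fun c => c) hperm.symm (by decide)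

-- ===== VERDICT (by name: the statement is the Claim_ definition above) =====
theorem is_perfect_pangram_spec : Claim_equal_is_perfect_pangram := by
  intro s _
  show is_perfect_pangram s = is_perfect_pangram_alt s
  simp only [is_perfect_pangram, is_perfect_pangram_alt, PySem.Str.toList_lower]
  have hnu : ∀ c ∈ PySem.Chars.lower s.toList, ¬(65 ≤ c.toNat ∧ c.toNat ≤ 90) := by
    intro c hc
    rcases List.mem_map.mp hc with ⟨c', -, rfl⟩
    exact pvLowerChar_not_upper c'
  rw [Bool.eq_iff_iff]
  rw [pvLoop_iff _ hnu, beq_iff_eq]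
  have hmem : ∀ c ∈ (PySem.Chars.lower s.toList).filter pvIsLower, pvIsLower c = true :=
    fun c hc => (List.mem_filter.mp hc).2
  rw [show (fun c => decide ('a' ≤ c) && decide (c ≤ 'z')) = pvIsLower from rfl]
  rw [pvSorted_eq_alph_iff _ hmem]
  simp only [PySem.Dict.contains_empty, implies_true, true_and]
  constructor
  · rintro ⟨hnd, hlen⟩; exact ⟨hnd, by omega⟩
  · rintro ⟨hnd, hlen⟩; exact ⟨hnd, by omega⟩
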